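-- pv_equiv track=rewrite | github.com/SimWalther/vietnam_coffee_detection | src/convNetUtils.py | k_fold_indices
-- ===== SOURCE A (Python) =====
-- from math import floor
--
-- def k_fold_indices(dataset, k=5):
--     # subdivise dataset in k folds
--     folds_indices = []
--     fold_size = floor(len(dataset) / k)
--     nb_larger_folds = len(dataset) % k
--     fold_start = 0
--
--     for fold_nb in range(k):
--         current_fold_size = fold_size
--
--         if fold_nb < nb_larger_folds:
--             current_fold_size += 1
--
--         fold_end = fold_start + current_fold_size
--         folds_indices.append((fold_start, fold_end))
--         fold_start = fold_end
--
--     return folds_indices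
-- ===== SOURCE B (Python) =====
-- def k_fold_indices(dataset, k=5):
--     # subdivise dataset in k folds: each fold's boundaries computed directly
--     # from its index (closed form), no carried fold_start accumulator.
--     fold_size = len(dataset) // k
--     nb_larger_folds = len(dataset) % k
--     return [
--         (i * fold_size + min(i, nb_larger_folds),
--          (i * fold_size + min(i, nb_larger_folds)) + fold_size + (1 if i < nb_larger_folds else 0))
--         for i in range(k)
--     ]
-- ===== Notes on version B (the rewrite author's own statement) =====
-- stated objective: alternative
-- what changed: Replaces the carried fold_start accumulator with a closed-form per-fold computation: each fold's start is i*fold_size + min(i, nb_larger_folds), so boundaries are produced by an independent map over range(k) instead of threaded state.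
-- outside the precondition, e.g. on k_fold_indices([1, 2, 3], 0): A raises ZeroDivisionError, B raises ZeroDivisionError
import Mathlib
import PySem

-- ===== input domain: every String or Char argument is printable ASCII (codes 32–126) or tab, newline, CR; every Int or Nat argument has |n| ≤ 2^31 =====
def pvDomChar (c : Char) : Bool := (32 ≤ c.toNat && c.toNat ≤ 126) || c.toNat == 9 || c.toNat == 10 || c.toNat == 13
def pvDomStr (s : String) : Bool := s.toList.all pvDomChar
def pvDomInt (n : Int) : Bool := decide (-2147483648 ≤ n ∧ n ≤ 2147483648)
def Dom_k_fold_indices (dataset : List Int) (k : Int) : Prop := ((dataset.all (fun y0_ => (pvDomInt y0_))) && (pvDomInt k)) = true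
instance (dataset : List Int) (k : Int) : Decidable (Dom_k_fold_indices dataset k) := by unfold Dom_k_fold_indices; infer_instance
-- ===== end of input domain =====

-- B replaces A's carried fold_start accumulator by a closed-form per-fold start
-- i*fold_size + min(i, nb_larger_folds) (objective: alternative decomposition, same cost).

-- ===== PORT A =====
-- floor(len(dataset)/k) is ported as integer floor division: exact here since
-- len(dataset) is a machine-small Nat and |k| ≤ 2^31, so the float quotient floors identically.
def k_fold_indices (dataset : List Int) (k : Int) : List (Int × Int) :=
  let fold_size := PySem.Int.floordiv (dataset.length : Int) k
  let nb_larger_folds := PySem.Int.mod (dataset.length : Int) k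
  ((PySem.List.pyRange 0 k 1).foldl
    (fun (st : List (Int × Int) × Int) fold_nb =>
      let current_fold_size := fold_size + (if fold_nb < nb_larger_folds then 1 else 0)
      let fold_end := st.2 + current_fold_size
      (st.1 ++ [(st.2, fold_end)], fold_end))
    ([], 0)).1

-- ===== PORT B =====
def k_fold_indices_alt (dataset : List Int) (k : Int) : List (Int × Int) :=
  let fold_size := PySem.Int.floordiv (dataset.length : Int) k
  let nb_larger_folds := PySem.Int.mod (dataset.length : Int) k
  (PySem.List.pyRange 0 k 1).map (fun i =>
    (i * fold_size + min i nb_larger_folds,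
     (i * fold_size + min i nb_larger_folds) + fold_size + (if i < nb_larger_folds then 1 else 0)))

-- ===== PRECONDITION & SPEC =====
-- Pre_ excludes exactly k = 0, where both Pythons raise ZeroDivisionError.
def Pre_k_fold_indices (dataset : List Int) (k : Int) : Prop := k ≠ 0
instance (dataset : List Int) (k : Int) : Decidable (Pre_k_fold_indices dataset k) := by unfold Pre_k_fold_indices; infer_instance
def pvWitness_k_fold_indices : List Int × Int := ([1, 2, 3, 4, 5], 2)
def Spec_k_fold_indices (dataset : List Int) (k : Int) (out : List (Int × Int)) : Prop := out = k_fold_indices_alt dataset k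
instance (dataset : List Int) (k : Int) (out : List (Int × Int)) : Decidable (Spec_k_fold_indices dataset k out) := by unfold Spec_k_fold_indices; infer_instance

-- ===== CLAIM (what is proved, stated in full; the proofs are below) =====
def Claim_equal_k_fold_indices : Prop := ∀ (dataset : List Int) (k : Int), Dom_k_fold_indices dataset k → Pre_k_fold_indices dataset k → Spec_k_fold_indices dataset k (k_fold_indices dataset k)

-- ===== LEMMAS AND PROOFS =====

-- Loop invariant: after the first n iterations, A's fold_start equals the closed form
-- n*fs + min n r, and the accumulated list is B's map over the same range.
lemma k_fold_loop_eq (fs r : Int) (hr : 0 ≤ r) (n : Nat) :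
    ((PySem.List.pyRange 0 (n : Int) 1).foldl
      (fun (st : List (Int × Int) × Int) fold_nb =>
        let current_fold_size := fs + (if fold_nb < r then 1 else 0)
        let fold_end := st.2 + current_fold_size
        (st.1 ++ [(st.2, fold_end)], fold_end))
      ([], 0))
    = ((PySem.List.pyRange 0 (n : Int) 1).map (fun i =>
        (i * fs + min i r, (i * fs + min i r) + fs + (if i < r then 1 else 0))),
       (n : Int) * fs + min (n : Int) r) := by
  induction n with
  | zero => simp [PySem.List.pyRange_one_eq_nil, min_eq_left hr]
  | succ n ih =>
    have h : ((n : Int) + 1) = ((n + 1 : Nat) : Int) := by push_cast; ring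
    rw [← h, PySem.List.pyRange_one_succ_right (by positivity),
        List.foldl_append, List.map_append, ih]
    simp only [List.foldl_cons, List.foldl_nil, List.map_cons, List.map_nil]
    refine Prod.ext ?_ ?_
    · simp only [add_assoc]
    · show (n : Int) * fs + min (n : Int) r + (fs + _) = ((n : Int) + 1) * fs + min ((n : Int) + 1) r
      rw [show ((n : Int) + 1) * fs = (n : Int) * fs + fs from by ring]
      simp only [min_def]
      split_ifs <;> omega

theorem k_fold_indices_spec : Claim_equal_k_fold_indices := by
  intro dataset k _hDom hk
  unfold Spec_k_fold_indices k_fold_indices k_fold_indices_alt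
  rcases lt_trichotomy k 0 with hneg | hzero | hpos
  · rw [PySem.List.pyRange_one_eq_nil (by omega)]
    simp
  · exact absurd hzero hk
  · obtain ⟨m, hm⟩ : ∃ m : Nat, k = (m : Int) := ⟨k.toNat, by omega⟩
    subst hm
    have hr : 0 ≤ PySem.Int.mod (dataset.length : Int) (m : Int) := by
      rw [PySem.Int.mod_eq_emod_of_pos hpos]
      exact Int.emod_nonneg _ (by omega)
    exact congrArg Prod.fst (k_fold_loop_eq _ _ hr m)
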